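-- pv_equiv track=rewrite | github.com/Shelam-Mehta/Twitter-Scraper | scraper.py | SeperateComments
-- ===== SOURCE A (Python) =====
-- def SeperateComments(response):
--     comment=[]
--     like=[]
--     retweet=[]
--     for i in range(len(response)):
--         if(i%3==0):
--             comment+=[response[i]]
--         elif(i%3==1):
--             retweet+=[response[i]]
--         else:
--             like+=[response[i]]
--     return comment,like,retweet
-- ===== SOURCE B (Python) =====
-- def SeperateComments(response):
--     # One chunked pass: peel off groups of up to 3 and route each position to its
--     # bucket (position 0 -> comment, 1 -> retweet, 2 -> like); no index/mod bookkeeping.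
--     comment, like, retweet = [], [], []
--     it = iter(response)
--     while True:
--         chunk = [x for _, x in zip((0, 1, 2), it)]
--         if not chunk:
--             break
--         comment += chunk[:1]
--         retweet += chunk[1:2]
--         like += chunk[2:3]
--     return comment, like, retweet
-- ===== Notes on version B (the rewrite author's own statement) =====
-- stated objective: alternative
-- what changed: Replaces the index loop with its i%3 three-way branch by a chunked pass that peels groups of three off the list and routes each chunk position straight to its bucket, with no range(), indexing or modulus.
import Mathlib
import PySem

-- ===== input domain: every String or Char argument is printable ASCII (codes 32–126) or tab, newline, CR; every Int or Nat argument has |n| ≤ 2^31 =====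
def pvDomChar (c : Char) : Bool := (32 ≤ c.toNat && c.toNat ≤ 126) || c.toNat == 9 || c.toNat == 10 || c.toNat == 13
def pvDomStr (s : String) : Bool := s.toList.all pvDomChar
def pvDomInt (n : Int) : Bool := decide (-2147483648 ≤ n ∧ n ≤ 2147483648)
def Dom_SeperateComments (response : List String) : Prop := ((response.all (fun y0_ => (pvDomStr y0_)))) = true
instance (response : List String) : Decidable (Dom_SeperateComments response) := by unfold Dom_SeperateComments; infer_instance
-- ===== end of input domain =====

-- B replaces A's index loop with i%3 branching by a single chunked pass over groups of three (alternative decomposition, same cost).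


-- ===== PORT A =====
-- loop body of A: the i%3 three-way branch; response[i] is always in range here,
-- so pyGetD with a default is exact (the foldl_pyRange_pyGetD idiom).
def stepFn (response : List String) (s : List String × List String × List String) (i : Int) :
    List String × List String × List String :=
  if PySem.Int.mod i 3 = 0 then (s.1 ++ [PySem.List.pyGetD response i ""], s.2.1, s.2.2)
  else if PySem.Int.mod i 3 = 1 then (s.1, s.2.1, s.2.2 ++ [PySem.List.pyGetD response i ""])
  else (s.1, s.2.1 ++ [PySem.List.pyGetD response i ""], s.2.2)

def SeperateComments (response : List String) : List String × List String × List String :=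
  (PySem.List.pyRange 0 (PySem.List.len response)).foldl (stepFn response) ([], [], [])

-- ===== PORT B =====
-- the while loop of Source B: each iteration takes the next chunk of up to 3 elements and
-- appends the slices chunk[:1], chunk[1:2], chunk[2:3] to the buckets; the chunk's ≤3
-- shapes are expanded as patterns (the slices are empty when the chunk is short).
def altGo (comment like retweet rest : List String) : List String × List String × List String :=
  match rest with
  | [] => (comment, like, retweet)
  | [a] => (comment ++ [a], like, retweet)
  | [a, b] => (comment ++ [a], like, retweet ++ [b])
  | a :: b :: c :: t => altGo (comment ++ [a]) (like ++ [c]) (retweet ++ [b]) t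

def SeperateComments_alt (response : List String) : List String × List String × List String :=
  altGo [] [] [] response

-- ===== PRECONDITION & SPEC =====
def Spec_SeperateComments (response : List String) (out : List String × List String × List String) : Prop := out = SeperateComments_alt response
instance (response : List String) (out : List String × List String × List String) : Decidable (Spec_SeperateComments response out) := by unfold Spec_SeperateComments; infer_instance

-- ===== CLAIM (what is proved, stated in full; the proofs are below) =====
def Claim_equal_SeperateComments : Prop := ∀ (response : List String), Dom_SeperateComments response → Spec_SeperateComments response (SeperateComments response)

-- ===== LEMMAS AND PROOFS =====

-- elements of a list at indices 0, 3, 6, …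
def pick0 : List String → List String
  | [] => []
  | [x] => [x]
  | [x, _] => [x]
  | x :: _ :: _ :: t => x :: pick0 t

theorem altGo_eq : ∀ (rest c l r : List String),
    altGo c l r rest = (c ++ pick0 rest, l ++ pick0 (rest.drop 2), r ++ pick0 (rest.drop 1))
  | [], c, l, r => by simp [altGo, pick0]
  | [x], c, l, r => by simp [altGo, pick0]
  | [x, b], c, l, r => by simp [altGo, pick0]
  | x :: b :: z :: t, c, l, r => by
      rw [show altGo c l r (x :: b :: z :: t)
            = altGo (c ++ [x]) (l ++ [z]) (r ++ [b]) t from rfl]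
      rw [altGo_eq]
      cases t with
      | nil => simp [pick0]
      | cons y t' =>
        cases t' with
        | nil => simp [pick0]
        | cons y2 t'' => simp [pick0]

theorem mod3_0 (k : ℕ) (h : k % 3 = 0) : PySem.Int.mod (k : Int) 3 = 0 := by
  simp [PySem.Int.mod, Int.fmod_eq_emod]; omega

theorem mod3_1 (k : ℕ) (h : k % 3 = 0) : PySem.Int.mod ((k : Int) + 1) 3 = 1 := by
  simp [PySem.Int.mod, Int.fmod_eq_emod]; omega

theorem mod3_2 (k : ℕ) (h : k % 3 = 0) : PySem.Int.mod ((k : Int) + 1 + 1) 3 = 2 := by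
  simp [PySem.Int.mod, Int.fmod_eq_emod]; omega

theorem getD_of_drop (ys t : List String) (k : ℕ) (x : String) (h : ys.drop k = x :: t) :
    PySem.List.pyGetD ys (k : Int) "" = x := by
  have h0 : ys[k]? = some x := by
    have h1 : (ys.drop k)[0]? = some x := by rw [h]; rfl
    simpa using h1
  simp [PySem.List.pyGetD_natCast, List.getD_eq_getElem?_getD, h0]

theorem step_c (ys : List String) (k : ℕ) (hk : k % 3 = 0) (t : List String) (x : String)
    (hd : ys.drop k = x :: t) (s : List String × List String × List String) :
    stepFn ys s (k : Int) = (s.1 ++ [x], s.2.1, s.2.2) := by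
  simp only [stepFn]
  rw [mod3_0 k hk, getD_of_drop ys t k x hd]
  simp

theorem step_r (ys : List String) (k : ℕ) (hk : k % 3 = 0) (t : List String) (b : String)
    (hd : ys.drop (k + 1) = b :: t) (s : List String × List String × List String) :
    stepFn ys s ((k : Int) + 1) = (s.1, s.2.1, s.2.2 ++ [b]) := by
  simp only [stepFn]
  rw [mod3_1 k hk]
  have hg : PySem.List.pyGetD ys ((k : Int) + 1) "" = b := by
    rw [show ((k : Int) + 1) = (((k + 1 : ℕ)) : Int) by push_cast; ring]
    exact getD_of_drop ys t (k + 1) b hd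
  rw [hg]; simp

theorem step_l (ys : List String) (k : ℕ) (hk : k % 3 = 0) (t : List String) (z : String)
    (hd : ys.drop (k + 2) = z :: t) (s : List String × List String × List String) :
    stepFn ys s ((k : Int) + 1 + 1) = (s.1, s.2.1 ++ [z], s.2.2) := by
  simp only [stepFn]
  rw [mod3_2 k hk]
  have hg : PySem.List.pyGetD ys ((k : Int) + 1 + 1) "" = z := by
    rw [show ((k : Int) + 1 + 1) = (((k + 2 : ℕ)) : Int) by push_cast; ring]
    exact getD_of_drop ys t (k + 2) z hd
  rw [hg]; simp

theorem A_loop : ∀ (t ys : List String) (k : ℕ) (c l r : List String),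
    k % 3 = 0 → ys.drop k = t →
    (PySem.List.pyRange (k : Int) (PySem.List.len ys)).foldl (stepFn ys) (c, l, r)
      = (c ++ pick0 t, l ++ pick0 (t.drop 2), r ++ pick0 (t.drop 1))
  | [], ys, k, c, l, r, hk, hd => by
      have hlen : ys.length ≤ k := by
        have := List.length_drop (l := ys) (i := k); rw [hd] at this; simp at this; omega
      rw [PySem.List.pyRange_one_eq_nil (by simp [PySem.List.len_eq]; exact_mod_cast hlen)]
      simp [pick0]
  | [x], ys, k, c, l, r, hk, hd => by
      have hlen : ys.length = k + 1 := by
        have := List.length_drop (l := ys) (i := k); rw [hd] at this; simp at this; omega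
      rw [PySem.List.pyRange_one_cons (by simp [PySem.List.len_eq, hlen])]
      rw [PySem.List.pyRange_one_eq_nil (by simp [PySem.List.len_eq, hlen])]
      simp only [List.foldl]
      rw [step_c ys k hk [] x hd]
      simp [pick0]
  | [x, b], ys, k, c, l, r, hk, hd => by
      have hlen : ys.length = k + 2 := by
        have := List.length_drop (l := ys) (i := k); rw [hd] at this; simp at this; omega
      have hd1 : ys.drop (k + 1) = [b] := by
        have h2 : (ys.drop k).drop 1 = ys.drop (k + 1) := by rw [List.drop_drop]
        rw [hd] at h2; simpa using h2.symm
      rw [PySem.List.pyRange_one_cons (by simp [PySem.List.len_eq, hlen])]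
      rw [PySem.List.pyRange_one_cons (by simp [PySem.List.len_eq, hlen])]
      rw [PySem.List.pyRange_one_eq_nil (by simp [PySem.List.len_eq, hlen]; omega)]
      simp only [List.foldl]
      rw [step_c ys k hk [b] x hd, step_r ys k hk [] b hd1]
      simp [pick0]
  | x :: b :: z :: t, ys, k, c, l, r, hk, hd => by
      have hlen : ys.length = k + 3 + t.length := by
        have := List.length_drop (l := ys) (i := k); rw [hd] at this; simp at this; omega
      have hd1 : ys.drop (k + 1) = b :: z :: t := by
        have h2 : (ys.drop k).drop 1 = ys.drop (k + 1) := by rw [List.drop_drop]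
        rw [hd] at h2; simpa using h2.symm
      have hd2 : ys.drop (k + 2) = z :: t := by
        have h2 : (ys.drop k).drop 2 = ys.drop (k + 2) := by rw [List.drop_drop]
        rw [hd] at h2; simpa using h2.symm
      have hd3 : ys.drop (k + 3) = t := by
        have h2 : (ys.drop k).drop 3 = ys.drop (k + 3) := by rw [List.drop_drop]
        rw [hd] at h2; simpa using h2.symm
      rw [PySem.List.pyRange_one_cons (by simp [PySem.List.len_eq, hlen]; omega)]
      rw [PySem.List.pyRange_one_cons (by simp [PySem.List.len_eq, hlen]; omega)]
      rw [PySem.List.pyRange_one_cons (by simp [PySem.List.len_eq, hlen]; omega)]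
      simp only [List.foldl]
      rw [step_c ys k hk (b :: z :: t) x hd, step_r ys k hk (z :: t) b hd1,
          step_l ys k hk t z hd2]
      rw [show ((k : Int) + 1 + 1 + 1) = (((k + 3 : ℕ)) : Int) by push_cast; ring]
      rw [A_loop t ys (k + 3) (c ++ [x]) (l ++ [z]) (r ++ [b]) (by omega) hd3]
      cases t with
      | nil => simp [pick0]
      | cons y t' =>
        cases t' with
        | nil => simp [pick0]
        | cons y2 t'' => simp [pick0]
termination_by t => t.length
decreasing_by simp; omega

-- ===== VERDICT (by name: the statement is the Claim_ definition above) =====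
theorem SeperateComments_spec : Claim_equal_SeperateComments := by
  intro response _
  unfold Spec_SeperateComments SeperateComments SeperateComments_alt
  have hA := A_loop response response 0 [] [] [] (by omega) (by simp)
  simp only [Nat.cast_zero] at hA
  rw [hA, altGo_eq]
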